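-- pv_equiv track=rewrite | github.com/CodingThrust/problem-reductions | docs/paper/verify-reductions/verify_x3c_ap.py | build_x3c_graph
-- ===== SOURCE A (Python) =====
-- import itertools
--
-- def build_x3c_graph(universe_size, subsets):
--     """
--     Build the directed graph per the paper's construction.
--     Returns (arcs, compatible_pairs, valid_triples).
--     """
--     elements = list(range(universe_size))
--
--     # Find compatible pairs: (i,j) with i<j that share a subset
--     compatible = set()
--     for C in subsets:
--         C_list = sorted(C)
--         for a, b in itertools.combinations(C_list, 2):
--             compatible.add((a, b))
--
--     valid_triples = set()
--     for C in subsets: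
--         valid_triples.add(tuple(sorted(C)))
--
--     arcs = []
--
--     # Compatibility / conflict arcs
--     for i, j in itertools.combinations(elements, 2):
--         if (i, j) in compatible:
--             # Forward arc only
--             arcs.append((i, j))
--         else:
--             # 2-cycle (conflict)
--             arcs.append((i, j))
--             arcs.append((j, i))
--
--     # Triple-exclusion arcs
--     for i, j, k in itertools.combinations(elements, 3):
--         if ((i, j) in compatible and (j, k) in compatible
--                 and (i, k) in compatible):
--             if (i, j, k) not in valid_triples:
--                 arcs.append((k, i))
--
--     return arcs, compatible, valid_triples
-- ===== SOURCE B (Python) =====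
-- import itertools
--
-- def build_x3c_graph(universe_size, subsets):
--     """
--     Same result as A, but the O(n^3) all-triples scan is replaced by an
--     output-sensitive walk over compatibility adjacency lists: triples are
--     enumerated only along edges of the compatibility graph.
--     """
--     n = universe_size
--     compatible = set()
--     for C in subsets:
--         C_list = sorted(C)
--         for a, b in itertools.combinations(C_list, 2):
--             compatible.add((a, b))
--
--     valid_triples = set()
--     for C in subsets:
--         valid_triples.add(tuple(sorted(C)))
--
--     # adjacency: successors of i inside the universe compatible with i (ascending)
--     adj = {i: [j for j in range(i + 1, n) if (i, j) in compatible]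
--            for i in range(n)}
--     adjset = {i: set(adj[i]) for i in range(n)}
--
--     arcs = []
--     for i in range(n):
--         si = adjset[i]
--         for j in range(i + 1, n):
--             if j in si:
--                 arcs.append((i, j))
--             else:
--                 arcs.append((i, j))
--                 arcs.append((j, i))
--
--     # triple-exclusion arcs: walk edges of the compatibility graph only
--     for i in range(n):
--         for j in adj[i]:
--             sj = adj[j]
--             si = adjset[i]
--             for k in sj:
--                 if k in si and (i, j, k) not in valid_triples:
--                     arcs.append((k, i))
--
--     return arcs, compatible, valid_triples
-- ===== Notes on version B (the rewrite author's own statement) =====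
-- stated objective: faster
-- what changed: The O(n^3) scan over all element triples is replaced by an output-sensitive walk over precomputed compatibility adjacency lists (triples are enumerated only along compatible edges), and the pair arcs are emitted from the same adjacency index instead of a global pair set.
import Mathlib
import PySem

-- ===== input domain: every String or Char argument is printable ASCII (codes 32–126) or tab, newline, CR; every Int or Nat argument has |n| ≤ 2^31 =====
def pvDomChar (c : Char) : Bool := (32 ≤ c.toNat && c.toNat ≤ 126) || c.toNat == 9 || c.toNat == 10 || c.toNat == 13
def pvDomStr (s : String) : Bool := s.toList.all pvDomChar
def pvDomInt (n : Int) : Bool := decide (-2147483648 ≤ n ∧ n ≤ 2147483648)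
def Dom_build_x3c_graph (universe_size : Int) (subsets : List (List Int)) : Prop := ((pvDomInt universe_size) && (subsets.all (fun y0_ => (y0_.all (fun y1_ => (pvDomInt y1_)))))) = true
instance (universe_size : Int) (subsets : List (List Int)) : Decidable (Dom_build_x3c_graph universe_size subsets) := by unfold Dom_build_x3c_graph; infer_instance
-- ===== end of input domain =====

-- B replaces A's O(n^3) all-triples scan by a walk over precomputed compatibility
-- adjacency lists (objective: faster); both build the same compatible/valid sets.

-- ===== PORT A =====
-- shared with port B: both Pythons build `compatible` and `valid_triples` by the identical code
def pvSortId (C : List Int) : List Int := PySem.List.sorted C (fun x => x)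

def pvCompatible (subsets : List (List Int)) : PySem.Set (Int × Int) :=
  subsets.foldl (fun s C =>
    (PySem.List.combinations (pvSortId C) 2).foldl (fun s p =>
      match p with
      | [a, b] => PySem.Set.add s (a, b)
      | _ => s) s) PySem.Set.empty

def pvValidTriples (subsets : List (List Int)) : PySem.Set (List Int) :=
  subsets.foldl (fun s C => PySem.Set.add s (pvSortId C)) PySem.Set.empty

def build_x3c_graph (universe_size : Int) (subsets : List (List Int)) :
    (List (Int × Int)) × (List (Int × Int)) × List (List Int) :=
  let elements := PySem.List.pyRange 0 universe_size 1
  let compatible := pvCompatible subsets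
  let valid_triples := pvValidTriples subsets
  -- compatibility / conflict arcs
  let arcs1 := (PySem.List.combinations elements 2).foldl (fun acc p =>
      match p with
      | [i, j] =>
        if PySem.Set.contains compatible (i, j) then acc ++ [(i, j)]
        else acc ++ [(i, j), (j, i)]
      | _ => acc) []
  -- triple-exclusion arcs
  let arcs2 := (PySem.List.combinations elements 3).foldl (fun acc t =>
      match t with
      | [i, j, k] =>
        if PySem.Set.contains compatible (i, j) && PySem.Set.contains compatible (j, k)
            && PySem.Set.contains compatible (i, k) then
          if !(PySem.Set.contains valid_triples [i, j, k]) then acc ++ [(k, i)] else acc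
        else acc
      | _ => acc) arcs1
  (arcs2, compatible, valid_triples)

-- ===== PORT B =====
def pvAdj (n : Int) (compatible : PySem.Set (Int × Int)) : PySem.Dict Int (List Int) :=
  (PySem.List.pyRange 0 n 1).foldl (fun d i =>
    d.insert i ((PySem.List.pyRange (i + 1) n 1).filter
      (fun j => PySem.Set.contains compatible (i, j)))) PySem.Dict.empty

def build_x3c_graph_alt (universe_size : Int) (subsets : List (List Int)) :
    (List (Int × Int)) × (List (Int × Int)) × List (List Int) :=
  let n := universe_size
  let compatible := pvCompatible subsets
  let valid_triples := pvValidTriples subsets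
  let adj := pvAdj n compatible
  let adjset : PySem.Dict Int (PySem.Set Int) :=
    (PySem.List.pyRange 0 n 1).foldl
      (fun d i => d.insert i (PySem.Set.ofList (adj.getD i []))) PySem.Dict.empty
  let arcs1 := (PySem.List.pyRange 0 n 1).foldl (fun acc i =>
      (PySem.List.pyRange (i + 1) n 1).foldl (fun acc j =>
        if PySem.Set.contains (adjset.getD i []) j then acc ++ [(i, j)]
        else acc ++ [(i, j), (j, i)]) acc) []
  let arcs2 := (PySem.List.pyRange 0 n 1).foldl (fun acc i =>
      (adj.getD i []).foldl (fun acc j =>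
        (adj.getD j []).foldl (fun acc k =>
          if PySem.Set.contains (adjset.getD i []) k
              && !(PySem.Set.contains valid_triples [i, j, k]) then
            acc ++ [(k, i)]
          else acc) acc) acc) arcs1
  (arcs2, compatible, valid_triples)

-- ===== PRECONDITION & SPEC =====
def Spec_build_x3c_graph (universe_size : Int) (subsets : List (List Int)) (out : (List (Int × Int)) × (List (Int × Int)) × List (List Int)) : Prop := out = build_x3c_graph_alt universe_size subsets
instance (universe_size : Int) (subsets : List (List Int)) (out : (List (Int × Int)) × (List (Int × Int)) × List (List Int)) : Decidable (Spec_build_x3c_graph universe_size subsets out) := by unfold Spec_build_x3c_graph; infer_instance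

-- ===== CLAIM (what is proved, stated in full; the proofs are below) =====
def Claim_equal_build_x3c_graph : Prop := ∀ (universe_size : Int) (subsets : List (List Int)), Dom_build_x3c_graph universe_size subsets → Spec_build_x3c_graph universe_size subsets (build_x3c_graph universe_size subsets)

-- ===== LEMMAS AND PROOFS =====

-- the value pvAdj stores at key i
def pvAdjL (n : Int) (c : PySem.Set (Int × Int)) (i : Int) : List Int :=
  (PySem.List.pyRange (i + 1) n 1).filter (fun j => PySem.Set.contains c (i, j))

theorem getD_fold_insert_not_mem {α : Type} (l : List Int) (f : Int → α)
    (d : PySem.Dict Int α) (i : Int) (v : α) (h : i ∉ l) :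
    (l.foldl (fun d k => d.insert k (f k)) d).getD i v = d.getD i v := by
  induction l generalizing d with
  | nil => rfl
  | cons k t ih =>
    simp only [List.mem_cons, not_or] at h
    simp only [List.foldl_cons]
    rw [ih _ h.2, PySem.Dict.getD_insert_of_ne _ _ _ h.1]

theorem getD_fold_insert_mem {α : Type} (l : List Int) (f : Int → α)
    (d : PySem.Dict Int α) (i : Int) (v : α) (h : i ∈ l) :
    (l.foldl (fun d k => d.insert k (f k)) d).getD i v = f i := by
  induction l generalizing d with
  | nil => cases h
  | cons k t ih =>
    simp only [List.foldl_cons]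
    by_cases ht : i ∈ t
    · exact ih _ ht
    · have : i = k := by rcases List.mem_cons.mp h with h' | h' <;> tauto
      subst this
      rw [getD_fold_insert_not_mem _ _ _ _ _ ht, PySem.Dict.getD_insert_self]

theorem pvAdj_getD (n : Int) (c : PySem.Set (Int × Int)) (i : Int)
    (h : i ∈ PySem.List.pyRange 0 n 1) :
    (pvAdj n c).getD i [] = pvAdjL n c i :=
  getD_fold_insert_mem _ _ _ _ _ h

theorem nodup_pvAdjL (n : Int) (c : PySem.Set (Int × Int)) (i : Int) :
    (pvAdjL n c i).Nodup :=
  (PySem.List.nodup_pyRange_one _ _).filter _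

theorem mem_pvAdjL (n : Int) (c : PySem.Set (Int × Int)) (i j : Int) :
    j ∈ pvAdjL n c i ↔ (i + 1 ≤ j ∧ j < n) ∧ (i, j) ∈ c := by
  simp [pvAdjL, List.mem_filter, PySem.List.mem_pyRange_one]

theorem contains_pvAdjL (n : Int) (c : PySem.Set (Int × Int)) (i j : Int)
    (h1 : i + 1 ≤ j) (h2 : j < n) :
    PySem.Set.contains (pvAdjL n c i) j = PySem.Set.contains c (i, j) := by
  rw [Bool.eq_iff_iff, PySem.Set.contains_iff, PySem.Set.contains_iff, mem_pvAdjL]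
  simp [h1, h2]

-- combinations of a range, in nested-range form
theorem comb2_pyRange (b : Int) (m : Nat) : ∀ (a : Int), (b - a).toNat = m →
    PySem.List.combinations (PySem.List.pyRange a b 1) 2 =
      (PySem.List.pyRange a b 1).flatMap
        (fun i => (PySem.List.pyRange (i + 1) b 1).map (fun j => [i, j])) := by
  induction m with
  | zero =>
    intro a h
    rw [PySem.List.pyRange_one_eq_nil (by omega)]
    rfl
  | succ m ih =>
    intro a h
    have hab : a < b := by omega
    rw [PySem.List.pyRange_one_cons hab, PySem.List.combinations_cons_succ,
      PySem.List.combinations_one, List.flatMap_cons, ih (a + 1) (by omega)]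
    simp [List.map_map, Function.comp_def]

theorem comb3_pyRange (b : Int) (m : Nat) : ∀ (a : Int), (b - a).toNat = m →
    PySem.List.combinations (PySem.List.pyRange a b 1) 3 =
      (PySem.List.pyRange a b 1).flatMap (fun i =>
        (PySem.List.pyRange (i + 1) b 1).flatMap (fun j =>
          (PySem.List.pyRange (j + 1) b 1).map (fun k => [i, j, k]))) := by
  induction m with
  | zero =>
    intro a h
    rw [PySem.List.pyRange_one_eq_nil (by omega)]
    rfl
  | succ m ih =>
    intro a h
    have hab : a < b := by omega
    rw [PySem.List.pyRange_one_cons hab, PySem.List.combinations_cons_succ,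
      comb2_pyRange b ((b - (a + 1)).toNat) (a + 1) rfl, List.flatMap_cons,
      ih (a + 1) (by omega), List.map_flatMap]
    simp [List.map_map, Function.comp_def]

theorem flatMap_filter_bool {α β : Type} (l : List α) (p : α → Bool) (f : α → List β) :
    (l.filter p).flatMap f = l.flatMap (fun x => if p x then f x else []) := by
  induction l with
  | nil => rfl
  | cons x t ih => by_cases h : p x <;> simp [h, ih]

-- A's pair-arc loop, as a flatMap over nested ranges
theorem pairA_flatMap (n : Int) (c : PySem.Set (Int × Int)) (acc : List (Int × Int)) :
    (PySem.List.combinations (PySem.List.pyRange 0 n 1) 2).foldl (fun acc p =>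
      match p with
      | [i, j] =>
        if PySem.Set.contains c (i, j) then acc ++ [(i, j)]
        else acc ++ [(i, j), (j, i)]
      | _ => acc) acc
    = acc ++ (PySem.List.pyRange 0 n 1).flatMap (fun i =>
        (PySem.List.pyRange (i + 1) n 1).flatMap (fun j =>
          if PySem.Set.contains c (i, j) then [(i, j)] else [(i, j), (j, i)])) := by
  have hb : (fun (acc : List (Int × Int)) (p : List Int) =>
      match p with
      | [i, j] =>
        if PySem.Set.contains c (i, j) then acc ++ [(i, j)]
        else acc ++ [(i, j), (j, i)]
      | _ => acc)
    = (fun acc p => acc ++ (match p with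
      | [i, j] => if PySem.Set.contains c (i, j) then [(i, j)] else [(i, j), (j, i)]
      | _ => [])) := by
    funext acc p
    rcases p with _ | ⟨i, _ | ⟨j, _ | ⟨k, t⟩⟩⟩ <;> simp <;> split_ifs <;> simp
  rw [hb, PySem.List.foldl_append_eq_flatMap,
    comb2_pyRange n n.toNat 0 (by omega), List.flatMap_assoc]
  congr 1
  apply List.flatMap_congr
  intro i _
  rw [List.flatMap_map]

-- A's triple-arc loop, as a flatMap over nested ranges
theorem tripleA_flatMap (n : Int) (c : PySem.Set (Int × Int))
    (v : PySem.Set (List Int)) (acc : List (Int × Int)) :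
    (PySem.List.combinations (PySem.List.pyRange 0 n 1) 3).foldl (fun acc t =>
      match t with
      | [i, j, k] =>
        if PySem.Set.contains c (i, j) && PySem.Set.contains c (j, k)
            && PySem.Set.contains c (i, k) then
          if !(PySem.Set.contains v [i, j, k]) then acc ++ [(k, i)] else acc
        else acc
      | _ => acc) acc
    = acc ++ (PySem.List.pyRange 0 n 1).flatMap (fun i =>
        (PySem.List.pyRange (i + 1) n 1).flatMap (fun j =>
          (PySem.List.pyRange (j + 1) n 1).flatMap (fun k =>
            if PySem.Set.contains c (i, j) && PySem.Set.contains c (j, k)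
                && PySem.Set.contains c (i, k) then
              if !(PySem.Set.contains v [i, j, k]) then [(k, i)] else []
            else []))) := by
  have hb : (fun (acc : List (Int × Int)) (t : List Int) =>
      match t with
      | [i, j, k] =>
        if PySem.Set.contains c (i, j) && PySem.Set.contains c (j, k)
            && PySem.Set.contains c (i, k) then
          if !(PySem.Set.contains v [i, j, k]) then acc ++ [(k, i)] else acc
        else acc
      | _ => acc)
    = (fun acc t => acc ++ (match t with
      | [i, j, k] =>
        if PySem.Set.contains c (i, j) && PySem.Set.contains c (j, k)
            && PySem.Set.contains c (i, k) then
          if !(PySem.Set.contains v [i, j, k]) then [(k, i)] else []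
        else []
      | _ => [])) := by
    funext acc t
    rcases t with _ | ⟨i, _ | ⟨j, _ | ⟨k, _ | ⟨l, t⟩⟩⟩⟩ <;> simp <;> split_ifs <;> simp
  rw [hb, PySem.List.foldl_append_eq_flatMap,
    comb3_pyRange n n.toNat 0 (by omega), List.flatMap_assoc]
  congr 1
  apply List.flatMap_congr
  intro i _
  rw [List.flatMap_assoc]
  apply List.flatMap_congr
  intro j _
  rw [List.flatMap_map]

-- B's pair-arc loop equals A's
theorem pairB_eq (n : Int) (c : PySem.Set (Int × Int)) :
    (PySem.List.pyRange 0 n 1).foldl (fun acc i =>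
      (PySem.List.pyRange (i + 1) n 1).foldl (fun acc j =>
        if PySem.Set.contains
            (((PySem.List.pyRange 0 n 1).foldl
              (fun d i => d.insert i (PySem.Set.ofList ((pvAdj n c).getD i [])))
              PySem.Dict.empty).getD i []) j then acc ++ [(i, j)]
        else acc ++ [(i, j), (j, i)]) acc) ([] : List (Int × Int))
    = [] ++ (PySem.List.pyRange 0 n 1).flatMap (fun i =>
        (PySem.List.pyRange (i + 1) n 1).flatMap (fun j =>
          if PySem.Set.contains c (i, j) then [(i, j)] else [(i, j), (j, i)])) := by
  rw [PySem.List.foldl_congr_mem (g := fun acc i => acc ++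
      (PySem.List.pyRange (i + 1) n 1).flatMap (fun j =>
        if PySem.Set.contains c (i, j) then [(i, j)] else [(i, j), (j, i)]))]
  · rw [PySem.List.foldl_append_eq_flatMap]
  · intro acc i hi
    rw [getD_fold_insert_mem _ _ _ _ _ hi, pvAdj_getD n c i hi,
      PySem.Set.ofList_eq_self_of_nodup _ (nodup_pvAdjL n c i)]
    rw [PySem.List.foldl_congr_mem (g := fun acc j => acc ++
        (if PySem.Set.contains c (i, j) then [(i, j)] else [(i, j), (j, i)]))]
    · rw [PySem.List.foldl_append_eq_flatMap]
    · intro acc' j hj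
      rw [PySem.List.mem_pyRange_one] at hj
      rw [contains_pvAdjL n c i j hj.1 hj.2]
      split <;> rfl

-- B's triple-arc loop equals A's
theorem tripleB_eq (n : Int) (c : PySem.Set (Int × Int))
    (v : PySem.Set (List Int)) (acc : List (Int × Int)) :
    (PySem.List.pyRange 0 n 1).foldl (fun acc i =>
      ((pvAdj n c).getD i []).foldl (fun acc j =>
        ((pvAdj n c).getD j []).foldl (fun acc k =>
          if PySem.Set.contains
              (((PySem.List.pyRange 0 n 1).foldl
                (fun d i => d.insert i (PySem.Set.ofList ((pvAdj n c).getD i [])))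
                PySem.Dict.empty).getD i []) k
              && !(PySem.Set.contains v [i, j, k]) then
            acc ++ [(k, i)]
          else acc) acc) acc) acc
    = acc ++ (PySem.List.pyRange 0 n 1).flatMap (fun i =>
        (PySem.List.pyRange (i + 1) n 1).flatMap (fun j =>
          (PySem.List.pyRange (j + 1) n 1).flatMap (fun k =>
            if PySem.Set.contains c (i, j) && PySem.Set.contains c (j, k)
                && PySem.Set.contains c (i, k) then
              if !(PySem.Set.contains v [i, j, k]) then [(k, i)] else []
            else []))) := by
  rw [PySem.List.foldl_congr_mem (g := fun acc i => acc ++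
      (PySem.List.pyRange (i + 1) n 1).flatMap (fun j =>
        (PySem.List.pyRange (j + 1) n 1).flatMap (fun k =>
          if PySem.Set.contains c (i, j) && PySem.Set.contains c (j, k)
              && PySem.Set.contains c (i, k) then
            if !(PySem.Set.contains v [i, j, k]) then [(k, i)] else []
          else [])))]
  · rw [PySem.List.foldl_append_eq_flatMap]
  · intro acc0 i hi
    have hi' := (PySem.List.mem_pyRange_one).mp hi
    rw [getD_fold_insert_mem _ _ _ _ _ hi, pvAdj_getD n c i hi,
      PySem.Set.ofList_eq_self_of_nodup _ (nodup_pvAdjL n c i)]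
    -- rewrite the j-loop body on members of pvAdjL n c i
    rw [PySem.List.foldl_congr_mem (g := fun acc j => acc ++
        (pvAdjL n c j).flatMap (fun k =>
          if PySem.Set.contains c (i, k) && !(PySem.Set.contains v [i, j, k]) then
            [(k, i)]
          else []))]
    · rw [PySem.List.foldl_append_eq_flatMap, pvAdjL, flatMap_filter_bool]
      congr 1
      apply List.flatMap_congr
      intro j hj
      rw [PySem.List.mem_pyRange_one] at hj
      rw [pvAdjL, flatMap_filter_bool]
      by_cases hij : (i, j) ∈ c
      · have hbij : PySem.Set.contains c (i, j) = true := by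
          rw [PySem.Set.contains_iff]; exact hij
        rw [if_pos hbij]
        apply List.flatMap_congr
        intro k hk
        rw [PySem.List.mem_pyRange_one] at hk
        by_cases h1 : (j, k) ∈ c <;> by_cases h2 : (i, k) ∈ c <;>
          by_cases h3 : [i, j, k] ∈ v <;> simp [hij, h1, h2, h3]
      · simp [hij]
    · intro acc1 j hj
      rw [mem_pvAdjL] at hj
      have hj0 : j ∈ PySem.List.pyRange 0 n 1 := by
        rw [PySem.List.mem_pyRange_one]; omega
      rw [pvAdj_getD n c j hj0]
      rw [PySem.List.foldl_congr_mem (g := fun acc k => acc ++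
          (if PySem.Set.contains c (i, k) && !(PySem.Set.contains v [i, j, k]) then
            [(k, i)]
          else []))]
      · rw [PySem.List.foldl_append_eq_flatMap]
      · intro acc2 k hk
        rw [mem_pvAdjL] at hk
        rw [contains_pvAdjL n c i k (by omega) (by omega)]
        split <;> simp

-- ===== VERDICT (by name: the statement is the Claim_ definition above) =====
theorem build_x3c_graph_spec : Claim_equal_build_x3c_graph := by
  intro n subsets _
  unfold Spec_build_x3c_graph build_x3c_graph build_x3c_graph_alt
  simp only []
  refine Prod.ext ?_ rfl
  show (PySem.List.combinations (PySem.List.pyRange 0 n 1) 3).foldl _ _ = _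
  rw [tripleA_flatMap n (pvCompatible subsets) (pvValidTriples subsets),
    pairA_flatMap n (pvCompatible subsets),
    tripleB_eq n (pvCompatible subsets) (pvValidTriples subsets),
    pairB_eq n (pvCompatible subsets)]
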